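-- pv_equiv track=rewrite | github.com/DoctorrDeep/sudoku-helper-solver-backend | src/helpers/verifiers.py | do_check
-- ===== SOURCE A (Python) =====
-- def do_check(nums: list[int]) -> bool:
--     """
--     Given a list of numbers, this function checks
--     - all non-zero numbers are mentioned only once
--     - all non-zero numbers are between 1 and 9
--     - all non-zero numbers are integers
--
--     Returns boolean of whether all of the above are
--     - satisfied (True) OR
--     - not satisfied (False)
--     """
--
--     # lambdas not allowed in this format in pep8
--     # zero_remover = lambda a_list: [i for i in a_list if i]
--     # nums = zero_remover(nums)
--
--     nums = [i for i in nums if i]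
--     unique = len(set(nums)) == len(nums)
--     correct = True
--     for i in nums:
--         if not (0 < i < 10 and isinstance(i, int)):
--             correct = False
--             break
--
--     return unique and correct
-- ===== SOURCE B (Python) =====
-- def do_check(nums: list[int]) -> bool:
--     seen = set()
--     for i in nums:
--         if not i:
--             continue
--         if i in seen or not (0 < i < 10 and isinstance(i, int)):
--             return False
--         seen.add(i)
--     return True
-- ===== Notes on version B (the rewrite author's own statement) =====
-- stated objective: simpler
-- what changed: Fuses A's separate set-length uniqueness test and its validation loop into a single pass maintaining an incremental 'seen' set, returning False at the first duplicate or out-of-range value instead of always building the full set.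
import Mathlib
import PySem

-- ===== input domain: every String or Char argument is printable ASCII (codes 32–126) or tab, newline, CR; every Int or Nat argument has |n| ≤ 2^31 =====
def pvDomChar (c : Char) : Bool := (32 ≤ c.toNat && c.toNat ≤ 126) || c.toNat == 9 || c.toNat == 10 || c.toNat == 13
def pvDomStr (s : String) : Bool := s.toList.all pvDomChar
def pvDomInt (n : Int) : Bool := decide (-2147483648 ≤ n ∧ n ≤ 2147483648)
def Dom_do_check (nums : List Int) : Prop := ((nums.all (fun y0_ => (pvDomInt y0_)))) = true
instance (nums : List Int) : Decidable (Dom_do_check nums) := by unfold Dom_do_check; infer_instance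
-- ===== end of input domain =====

-- B fuses A's separate set-length uniqueness test and validation loop into one
-- early-return pass over the nonzero elements maintaining an incremental 'seen' set (objective: simpler).


-- ===== PORT A =====
-- 'for i in nums: if not (0 < i < 10 and isinstance(i, int)): correct = False; break'
-- (isinstance(i, int) is True for every element of a list[int]; the break is the early 'false')
def aCorrectLoop : List Int → Bool
  | [] => true
  | i :: rest => if !(decide (0 < i) && decide (i < 10)) then false else aCorrectLoop rest

def do_check (nums : List Int) : Bool :=
  let nums' := nums.filter (fun i => decide (i ≠ 0))              -- nums = [i for i in nums if i]
  let unique := (PySem.Set.ofList nums').length == nums'.length   -- len(set(nums)) == len(nums)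
  let correct := aCorrectLoop nums'
  unique && correct

-- ===== PORT B =====
def bLoop (seen : PySem.Set Int) : List Int → Bool
  | [] => true                                                    -- 'return True' after the loop
  | i :: rest =>
    if i = 0 then bLoop seen rest                                 -- 'if not i: continue'
    else if PySem.Set.contains seen i || !(decide (0 < i) && decide (i < 10)) then false
    else bLoop (PySem.Set.add seen i) rest                        -- 'seen.add(i)'

def do_check_alt (nums : List Int) : Bool := bLoop PySem.Set.empty nums

-- ===== PRECONDITION & SPEC =====
def Spec_do_check (nums : List Int) (out : Bool) : Prop := out = do_check_alt nums
instance (nums : List Int) (out : Bool) : Decidable (Spec_do_check nums out) := by unfold Spec_do_check; infer_instance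

-- ===== CLAIM (what is proved, stated in full; the proofs are below) =====
def Claim_equal_do_check : Prop := ∀ (nums : List Int), Dom_do_check nums → Spec_do_check nums (do_check nums)

-- ===== LEMMAS AND PROOFS =====

lemma aCorrectLoop_eq_all (l : List Int) :
    aCorrectLoop l = l.all (fun i => decide (0 < i) && decide (i < 10)) := by
  induction l with
  | nil => rfl
  | cons i rest ih =>
    simp only [aCorrectLoop, List.all_cons]
    by_cases h : (decide (0 < i) && decide (i < 10)) = true <;> simp [h, ih]

lemma length_ofList_eq_iff_nodup (l : List Int) :
    (PySem.Set.ofList l).length = l.length ↔ l.Nodup := by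
  induction l with
  | nil => simp
  | cons x xs ih =>
    rw [PySem.Set.ofList_cons]
    by_cases hx : x ∈ xs
    · have hx' : x ∈ PySem.Set.ofList xs := (PySem.Set.mem_ofList xs x).2 hx
      constructor
      · intro h
        exfalso
        have h1 : (PySem.Set.discard (PySem.Set.ofList xs) x).length < (PySem.Set.ofList xs).length := by
          have hno : x ∉ PySem.Set.discard (PySem.Set.ofList xs) x := by
            intro hmem
            exact ((PySem.Set.mem_discard (PySem.Set.ofList xs) x x).1 hmem).2 rfl
          have hsub : (PySem.Set.discard (PySem.Set.ofList xs) x).Sublist (PySem.Set.ofList xs) :=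
            List.filter_sublist
          rcases Nat.lt_or_ge (PySem.Set.discard (PySem.Set.ofList xs) x).length
              (PySem.Set.ofList xs).length with hl | hge
          · exact hl
          · have he := hsub.eq_of_length_le hge
            exact absurd (he.symm ▸ hx') hno
        have h2 : (PySem.Set.ofList xs).length ≤ xs.length := PySem.Set.length_ofList_le xs
        simp only [List.length_cons] at h
        omega
      · intro h
        exact absurd hx (List.nodup_cons.1 h).1
    · have hd : PySem.Set.discard (PySem.Set.ofList xs) x = PySem.Set.ofList xs := by
        unfold PySem.Set.discard
        apply List.filter_eq_self.2
        intro a ha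
        have haxs : a ∈ xs := (PySem.Set.mem_ofList xs a).1 ha
        simp only [Bool.not_eq_true', beq_eq_false_iff_ne, ne_eq]
        rintro rfl; exact hx haxs
      rw [hd]
      simp only [List.length_cons, Nat.succ_inj, List.nodup_cons]
      rw [ih]
      tauto

lemma bLoop_true_iff (l : List Int) (seen : PySem.Set Int) :
    bLoop seen l = true ↔
      ((∀ i ∈ l.filter (fun i => decide (i ≠ 0)), (0 < i ∧ i < 10) ∧ i ∉ seen)
        ∧ (l.filter (fun i => decide (i ≠ 0))).Nodup) := by
  induction l generalizing seen with
  | nil => simp [bLoop]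
  | cons i rest ih =>
    by_cases hz : i = 0
    · simpa [bLoop, hz] using ih seen
    · rw [bLoop, if_neg hz]
      have hfc : (i :: rest).filter (fun i => decide (i ≠ 0))
          = i :: rest.filter (fun i => decide (i ≠ 0)) :=
        List.filter_cons_of_pos (decide_eq_true hz)
      by_cases hm : i ∈ seen
      · rw [if_pos (by simp only [Bool.or_eq_true, (PySem.Set.contains_iff seen i).2 hm]; left; trivial)]
        rw [hfc]
        simp only [Bool.false_eq_true, false_iff, not_and]
        intro h
        exact absurd (h i List.mem_cons_self).2 (not_not_intro hm)
      · have hcf : PySem.Set.contains seen i = false := by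
          rcases Bool.eq_false_or_eq_true (PySem.Set.contains seen i) with h | h
          · exact absurd ((PySem.Set.contains_iff seen i).1 h) hm
          · exact h
        by_cases hr : 0 < i ∧ i < 10
        · rw [if_neg (by rw [hcf]; simp [hr.1, hr.2]), ih (PySem.Set.add seen i), hfc]
          constructor
          · rintro ⟨h1, h2⟩
            refine ⟨?_, ?_⟩
            · intro j hj
              rcases List.mem_cons.1 hj with rfl | hj'
              · exact ⟨hr, hm⟩
              · have := h1 j hj'
                exact ⟨this.1, fun hs => this.2 ((PySem.Set.mem_add seen i j).2 (Or.inl hs))⟩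
            · rw [List.nodup_cons]
              refine ⟨fun hi => ?_, h2⟩
              exact (h1 i hi).2 ((PySem.Set.mem_add seen i i).2 (Or.inr rfl))
          · rintro ⟨h1, h2⟩
            rw [List.nodup_cons] at h2
            refine ⟨fun j hj => ⟨(h1 j (List.mem_cons_of_mem _ hj)).1, fun hs => ?_⟩, h2.2⟩
            rcases (PySem.Set.mem_add seen i j).1 hs with hjs | rfl
            · exact (h1 j (List.mem_cons_of_mem _ hj)).2 hjs
            · exact h2.1 hj
        · rw [if_pos (by rw [hcf]; simp only [Bool.false_or, Bool.not_eq_true',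
            Bool.and_eq_false_iff, decide_eq_false_iff_not]; omega), hfc]
          simp only [Bool.false_eq_true, false_iff, not_and]
          intro h
          exact absurd (h i List.mem_cons_self).1 hr

lemma do_check_true_iff (nums : List Int) :
    do_check nums = true ↔
      ((∀ i ∈ nums.filter (fun i => decide (i ≠ 0)), 0 < i ∧ i < 10)
        ∧ (nums.filter (fun i => decide (i ≠ 0))).Nodup) := by
  unfold do_check
  simp only [Bool.and_eq_true, beq_iff_eq, aCorrectLoop_eq_all,
    length_ofList_eq_iff_nodup, List.all_eq_true, Bool.and_eq_true, decide_eq_true_eq]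
  tauto

lemma do_check_alt_true_iff (nums : List Int) :
    do_check_alt nums = true ↔
      ((∀ i ∈ nums.filter (fun i => decide (i ≠ 0)), 0 < i ∧ i < 10)
        ∧ (nums.filter (fun i => decide (i ≠ 0))).Nodup) := by
  unfold do_check_alt
  rw [bLoop_true_iff]
  constructor
  · rintro ⟨h1, h2⟩
    exact ⟨fun i hi => (h1 i hi).1, h2⟩
  · rintro ⟨h1, h2⟩
    exact ⟨fun i hi => ⟨h1 i hi, by simp [PySem.Set.empty]⟩, h2⟩

-- ===== VERDICT (by name: the statement is the Claim_ definition above) =====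
theorem do_check_spec : Claim_equal_do_check := by
  intro nums _
  unfold Spec_do_check
  rw [Bool.eq_iff_iff, do_check_true_iff, do_check_alt_true_iff]
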